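-- pv_equiv track=rewrite | github.com/IfimoAI/moju | apps/moju_studio/studio_io.py | merge_monitor_config_fragment
-- ===== SOURCE A (Python) =====
-- from typing import Any, Dict, Tuple
--
-- def merge_monitor_config_fragment(
--     base: Dict[str, Any], fragment: Dict[str, Any]
-- ) -> Dict[str, Any]:
--     """Shallow merge for top-level keys (laws, groups, audits replace if present in fragment)."""
--     out = dict(base)
--     for k, v in fragment.items():
--         if k == "constants" and isinstance(v, dict):
--             cur = dict(out.get("constants") or {})
--             for ck, cv in v.items():
--                 cur[ck] = cv
--             out["constants"] = cur
--         else: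
--             out[k] = v
--     return out
-- ===== SOURCE B (Python) =====
-- def merge_monitor_config_fragment(base, fragment):
--     """Rebuild the result from scratch: compute the final key order, then map each
--     key to its final value (fragment wins; 'constants' gets a key-wise sub-merge)."""
--     fc = fragment.get("constants")
--
--     def merged_constants():
--         bc = dict(base.get("constants") or {})
--         sub_order = list(bc) + [ck for ck in fc if ck not in bc]
--         return {ck: (fc[ck] if ck in fc else bc[ck]) for ck in sub_order}
--
--     order = list(base) + [k for k in fragment if k not in base]
--     return {
--         k: (merged_constants()
--             if k == "constants" and isinstance(fc, dict)
--             else (fragment[k] if k in fragment else base[k]))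
--         for k in order
--     }
-- ===== Notes on version B (the rewrite author's own statement) =====
-- stated objective: alternative
-- what changed: B rebuilds the result from scratch: it computes the final key order (base keys then new fragment keys) and maps each key to its final value by lookup via dict comprehensions, instead of A's imperative mutation of a copied dict in a loop.
import Mathlib
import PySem

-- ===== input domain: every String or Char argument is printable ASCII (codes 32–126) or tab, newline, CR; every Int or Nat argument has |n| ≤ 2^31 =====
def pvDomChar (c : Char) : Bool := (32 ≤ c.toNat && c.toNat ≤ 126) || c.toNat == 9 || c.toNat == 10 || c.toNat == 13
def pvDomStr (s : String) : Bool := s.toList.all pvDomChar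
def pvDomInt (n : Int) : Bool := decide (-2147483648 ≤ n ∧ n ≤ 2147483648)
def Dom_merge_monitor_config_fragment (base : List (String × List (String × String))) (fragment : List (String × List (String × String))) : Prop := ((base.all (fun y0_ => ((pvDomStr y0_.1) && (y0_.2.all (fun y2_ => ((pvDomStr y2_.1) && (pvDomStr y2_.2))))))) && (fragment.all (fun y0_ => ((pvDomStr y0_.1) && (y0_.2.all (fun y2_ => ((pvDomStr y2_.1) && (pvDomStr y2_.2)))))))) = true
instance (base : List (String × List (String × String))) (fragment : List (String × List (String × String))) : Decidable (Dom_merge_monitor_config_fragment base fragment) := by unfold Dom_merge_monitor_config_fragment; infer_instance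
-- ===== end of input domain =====

-- B rebuilds the result from scratch — it computes the final key order and maps every key
-- to its final value by lookup — instead of A's mutation of a copied dict (alternative; same cost).

-- ===== PORT A =====
-- 'out = dict(base); for k, v in fragment.items(): if k == "constants" (a dict under
-- this typing, so the isinstance guard always holds): sub-merge; else out[k] = v'.
def merge_monitor_config_fragment (base : List (String × List (String × String))) (fragment : List (String × List (String × String))) : List (String × List (String × String)) :=
  (fragment.foldl
    (fun (out : PySem.Dict String (List (String × String))) kv =>
      if kv.1 == "constants" then
        -- cur = dict(out.get("constants") or {}); for ck, cv in v.items(): cur[ck] = cv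
        let cur : PySem.Dict String String :=
          kv.2.foldl (fun c p => c.insert p.1 p.2)
            (PySem.Dict.ofList (out.getD "constants" []))
        out.insert "constants" cur.items
      else out.insert kv.1 kv.2)
    (PySem.Dict.ofList base)).items

-- ===== PORT B =====
-- merged_constants(): bc = dict(base.get("constants") or {}); sub_order = list(bc) + new keys
-- of fc; {ck: fc[ck] if ck in fc else bc[ck] for ck in sub_order}.  The fc[ck]/bc[ck]
-- subscripts cannot raise: each ck lies in fc or in bc by construction of sub_order, so the
-- getD defaults are never read.
def pvMergedConstants (base : List (String × List (String × String))) (c : List (String × String)) : List (String × String) :=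
  let bc : PySem.Dict String String := PySem.Dict.ofList ((PySem.Dict.ofList base).getD "constants" [])
  let cd : PySem.Dict String String := PySem.Dict.ofList c
  let sub_order := bc.keys ++ cd.keys.filter (fun ck => !(bc.contains ck))
  (PySem.Dict.ofList (sub_order.map (fun ck => (ck, if cd.contains ck then cd.getD ck "" else bc.getD ck "")))).items

-- 'fc = fragment.get("constants"); order = list(base) + [k for k in fragment if k not in base];
-- {k: merged_constants() if k == "constants" and isinstance(fc, dict) else (fragment[k] if k in
-- fragment else base[k]) for k in order}' — under this typing fc, when present, is always a dict.
-- The fragment[k]/base[k] subscripts cannot raise (k comes from one of them), so getD's default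
-- is never read.
def merge_monitor_config_fragment_alt (base : List (String × List (String × String))) (fragment : List (String × List (String × String))) : List (String × List (String × String)) :=
  let bd := PySem.Dict.ofList base
  let fd := PySem.Dict.ofList fragment
  let fc := fd.get? "constants"
  let order := bd.keys ++ fd.keys.filter (fun k => !(bd.contains k))
  (PySem.Dict.ofList (order.map (fun k =>
     (k, match fc with
         | some c =>
             if k == "constants" then pvMergedConstants base c
             else (if fd.contains k then fd.getD k [] else bd.getD k [])
         | none => if fd.contains k then fd.getD k [] else bd.getD k [])))).items

-- ===== PRECONDITION & SPEC =====
-- Pre_ only requires fragment's keys to be pairwise distinct: every association list that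
-- encodes a Python dict (the function's actual argument type) satisfies this, so no input
-- the Python A accepts is excluded.
def Pre_merge_monitor_config_fragment (base : List (String × List (String × String))) (fragment : List (String × List (String × String))) : Prop :=
  (fragment.map Prod.fst).Nodup
instance (base : List (String × List (String × String))) (fragment : List (String × List (String × String))) : Decidable (Pre_merge_monitor_config_fragment base fragment) := by unfold Pre_merge_monitor_config_fragment; infer_instance

def pvWitness_merge_monitor_config_fragment : (List (String × List (String × String))) × (List (String × List (String × String))) :=
  ([("constants", [("x", "1")]), ("laws", [("l", "a")])],
   [("constants", [("y", "2")]), ("groups", [])])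

def Spec_merge_monitor_config_fragment (base : List (String × List (String × String))) (fragment : List (String × List (String × String))) (out : List (String × List (String × String))) : Prop := out = merge_monitor_config_fragment_alt base fragment
instance (base : List (String × List (String × String))) (fragment : List (String × List (String × String))) (out : List (String × List (String × String))) : Decidable (Spec_merge_monitor_config_fragment base fragment out) := by unfold Spec_merge_monitor_config_fragment; infer_instance

-- ===== CLAIM (what is proved, stated in full; the proofs are below) =====
def Claim_equal_merge_monitor_config_fragment : Prop := ∀ (base : List (String × List (String × String))) (fragment : List (String × List (String × String))), Dom_merge_monitor_config_fragment base fragment → Pre_merge_monitor_config_fragment base fragment → Spec_merge_monitor_config_fragment base fragment (merge_monitor_config_fragment base fragment)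

-- ===== LEMMAS AND PROOFS =====

-- A's loop body, named for the proofs.
def pvStepA (out : PySem.Dict String (List (String × String))) (kv : String × List (String × String)) : PySem.Dict String (List (String × String)) :=
  if kv.1 == "constants" then
    let cur : PySem.Dict String String :=
      kv.2.foldl (fun c p => c.insert p.1 p.2)
        (PySem.Dict.ofList (out.getD "constants" []))
    out.insert "constants" cur.items
  else out.insert kv.1 kv.2

theorem pvFoldA_eq (base fragment : List (String × List (String × String))) :
    merge_monitor_config_fragment base fragment
      = (fragment.foldl pvStepA (PySem.Dict.ofList base)).items := rfl

-- two inserts at distinct keys commute (as dicts, items included) when the first key is present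
theorem pvInsert_comm_of_contains {ν : Type} (d : PySem.Dict String ν) (k k' : String)
    (c v' : ν) (hc : d.contains k = true) (hne : k' ≠ k) :
    (d.insert k' v').insert k c = (d.insert k c).insert k' v' := by
  have hc1 : (d.insert k' v').contains k = true := by
    rw [PySem.Dict.contains_insert]; simp [hc]
  apply PySem.Dict.ext
  by_cases hk' : d.contains k' = true
  · have hc2 : (d.insert k c).contains k' = true := by
      rw [PySem.Dict.contains_insert]; simp [hk']
    rw [PySem.Dict.items_insert_of_contains _ _ hc1, PySem.Dict.items_insert_of_contains _ _ hk',
        PySem.Dict.items_insert_of_contains _ _ hc2, PySem.Dict.items_insert_of_contains _ _ hc]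
    simp only [List.map_map]
    apply List.map_congr_left
    intro p _
    simp only [Function.comp]
    by_cases h1 : p.1 = k'
    · simp [h1, hne]
    · by_cases h2 : p.1 = k <;> simp [h1, h2, Ne.symm hne]
  · have hc2 : (d.insert k c).contains k' = false := by
      rw [PySem.Dict.contains_insert]; simp [hk', hne]
    rw [PySem.Dict.items_insert_of_contains _ _ hc1,
        PySem.Dict.items_insert_of_not_contains _ _ (by simpa using hk'),
        PySem.Dict.items_insert_of_not_contains _ _ hc2,
        PySem.Dict.items_insert_of_contains _ _ hc]
    simp [hne]

-- an insert at a key absent from the update list floats left through the update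
theorem pvInsert_update_comm {ν : Type} (d : PySem.Dict String ν) (k : String) (c : ν)
    (rest : List (String × ν)) (hc : d.contains k = true)
    (hk : k ∉ rest.map Prod.fst) :
    (d.update rest).insert k c = (d.insert k c).update rest := by
  induction rest generalizing d with
  | nil => rfl
  | cons p r ih =>
    simp only [List.map_cons, List.mem_cons, not_or] at hk
    show ((d.insert p.1 p.2).update r).insert k c = ((d.insert k c).insert p.1 p.2).update r
    rw [ih _ (by rw [PySem.Dict.contains_insert]; simp [hc]) hk.2,
        pvInsert_comm_of_contains _ _ _ _ _ hc (Ne.symm hk.1)]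

-- A's loop without any "constants" key is a plain dict update
theorem pvFoldA_no_constants (l : List (String × List (String × String)))
    (out : PySem.Dict String (List (String × String)))
    (h : "constants" ∉ l.map Prod.fst) :
    l.foldl pvStepA out = out.update l := by
  induction l generalizing out with
  | nil => rfl
  | cons p rest ih =>
    simp only [List.map_cons, List.mem_cons, not_or] at h
    have hb : (p.1 == "constants") = false := by
      simp; exact fun e => h.1 e.symm
    simp only [List.foldl_cons, pvStepA, hb, Bool.false_eq_true]
    exact ih _ h.2

-- lookups through a fold of inserts depend on the seed only through the looked-up key
theorem pvGet?_foldl_insert_congr {ν : Type} (l : List (String × ν))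
    (d d' : PySem.Dict String ν) (x : String) (h : d.get? x = d'.get? x) :
    (l.foldl (fun d p => d.insert p.1 p.2) d).get? x
      = (l.foldl (fun d p => d.insert p.1 p.2) d').get? x := by
  induction l generalizing d d' with
  | nil => simpa
  | cons p rest ih =>
    simp only [List.foldl_cons]
    apply ih
    rw [PySem.Dict.get?_insert, PySem.Dict.get?_insert, h]

theorem pvGet?_update_of_notmem {ν : Type} (l : List (String × ν))
    (d : PySem.Dict String ν) (x : String) (h : x ∉ l.map Prod.fst) :
    (d.update l).get? x = d.get? x := by
  induction l generalizing d with
  | nil => simp [PySem.Dict.update]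
  | cons p rest ih =>
    simp only [List.map_cons, List.mem_cons, not_or] at h
    show ((d.insert p.1 p.2).update rest).get? x = d.get? x
    rw [ih _ h.2, PySem.Dict.get?_insert_of_ne _ _ h.1]

-- the main invariant of A's loop: from any seed it equals bulk-update-then-patch
theorem pvMain (l : List (String × List (String × String)))
    (out : PySem.Dict String (List (String × String)))
    (h : (l.map Prod.fst).Nodup) :
    l.foldl pvStepA out =
      match (PySem.Dict.ofList l).get? "constants" with
      | some c =>
          (out.update l).insert "constants"
            ((PySem.Dict.ofList (out.getD "constants" [])).update c).items
      | none => out.update l := by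
  induction l generalizing out with
  | nil => rfl
  | cons p rest ih =>
    simp only [List.map_cons, List.nodup_cons] at h
    have hofl : PySem.Dict.ofList (p :: rest)
        = (PySem.Dict.empty.insert p.1 p.2).update rest := rfl
    by_cases hk : p.1 = "constants"
    · have hrest : "constants" ∉ rest.map Prod.fst := hk ▸ h.1
      have hg : (PySem.Dict.ofList (p :: rest)).get? "constants" = some p.2 := by
        rw [hofl, pvGet?_update_of_notmem _ _ _ hrest, ← hk]
        exact PySem.Dict.get?_insert_self _ _ _
      rw [hg]
      have hstep : pvStepA out p = out.insert "constants"
          ((PySem.Dict.ofList (out.getD "constants" [])).update p.2).items := by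
        simp only [pvStepA, hk, beq_self_eq_true, if_pos]
        rfl
      show rest.foldl pvStepA (pvStepA out p) = _
      rw [hstep, pvFoldA_no_constants _ _ hrest]
      show _ = ((out.insert p.1 p.2).update rest).insert "constants" _
      rw [pvInsert_update_comm _ _ _ _ (by rw [PySem.Dict.contains_insert]; simp [hk]) hrest,
          hk, PySem.Dict.insert_insert_self]
    · have hb : (p.1 == "constants") = false := by simpa using hk
      have hstep : pvStepA out p = out.insert p.1 p.2 := by
        simp [pvStepA, hb]
      show rest.foldl pvStepA (pvStepA out p) = _
      rw [hstep, ih _ h.2]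
      have hgeq : (PySem.Dict.ofList (p :: rest)).get? "constants"
          = (PySem.Dict.ofList rest).get? "constants" := by
        rw [hofl]
        exact pvGet?_foldl_insert_congr rest _ _ _
          (PySem.Dict.get?_insert_of_ne _ _ (Ne.symm hk))
      rw [hgeq]
      rw [show (out.insert p.1 p.2).getD "constants" [] = out.getD "constants" [] from
            PySem.Dict.getD_insert_of_ne _ p.2 [] (Ne.symm hk)]
      rfl

-- ===== B-side characterisation lemmas =====

-- lookup through a bulk update: the update list wins where it has the key
theorem pvGet?_update {ν : Type} (l : List (String × ν)) (d : PySem.Dict String ν) (x : String) :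
    (d.update l).get? x = ((PySem.Dict.ofList l).get? x).or (d.get? x) := by
  induction l generalizing d with
  | nil =>
      rw [show PySem.Dict.ofList ([] : List (String × ν)) = PySem.Dict.empty from rfl]
      simp [PySem.Dict.update, PySem.Dict.get?_empty]
  | cons p rest ih =>
    have h1 : (d.update (p :: rest)).get? x = ((d.insert p.1 p.2).update rest).get? x := rfl
    have h2 : (PySem.Dict.ofList (p :: rest)).get? x
        = ((PySem.Dict.empty.insert p.1 p.2).update rest).get? x := rfl
    rw [h1, h2, ih, ih]
    cases hr : (PySem.Dict.ofList rest).get? x with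
    | some v => simp
    | none =>
        simp only [Option.none_or]
        rw [PySem.Dict.get?_insert, PySem.Dict.get?_insert]
        split_ifs <;> simp [PySem.Dict.get?_empty]

theorem pvGetD_update {ν : Type} (l : List (String × ν)) (d : PySem.Dict String ν)
    (x : String) (dflt : ν) :
    (d.update l).getD x dflt =
      if (PySem.Dict.ofList l).contains x then (PySem.Dict.ofList l).getD x dflt
      else d.getD x dflt := by
  rw [PySem.Dict.getD_eq_get?_getD, PySem.Dict.getD_eq_get?_getD, PySem.Dict.getD_eq_get?_getD,
      pvGet?_update, PySem.Dict.contains_eq_isSome_get?]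
  cases (PySem.Dict.ofList l).get? x <;> simp

-- keys of a bulk update: old keys, then the genuinely new keys in first-occurrence order
theorem pvKeys_update {ν : Type} (l : List (String × ν)) (d : PySem.Dict String ν) :
    (d.update l).keys = d.keys ++ (PySem.Dict.ofList l).keys.filter (fun k => !(d.contains k)) := by
  have hu : ∀ (e : PySem.Dict String ν), e.update l
      = l.foldl (fun d (x : String × ν) => d.insert x.1 x.2) e := fun _ => rfl
  have hk : (d.update l).keys = PySem.Set.update d.keys (l.map Prod.fst) := by
    rw [hu]
    exact PySem.Dict.keys_foldl_insert_key l Prod.fst (fun _ x => x.2) d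
  have hk0 : (PySem.Dict.ofList l).keys = PySem.Set.ofList (l.map Prod.fst) := by
    have := PySem.Dict.keys_foldl_insert_key l Prod.fst (fun _ x => x.2) PySem.Dict.empty
    simpa [PySem.Dict.keys_empty, PySem.Set.update_nil_left] using this
  rw [hk, hk0, PySem.Set.update_eq_append_filter]
  congr 1
  apply List.filter_congr
  intro k _
  rw [PySem.Dict.contains_eq_decide_mem_keys]
  simp [PySem.Set.contains_eq_listContains]

-- a dict built from a duplicate-free association list has exactly that items list
theorem pvItems_ofList {ν : Type} (xs : List (String × ν)) (h : (xs.map Prod.fst).Nodup) :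
    (PySem.Dict.ofList xs).items = xs := by
  induction xs using List.reverseRecOn with
  | nil => rfl
  | append_singleton ys p ih =>
    have hmap : (ys.map Prod.fst).Nodup ∧ p.1 ∉ ys.map Prod.fst := by
      rw [List.map_append] at h
      simp only [List.map_cons, List.map_nil] at h
      exact ⟨h.of_append_left, by
        intro hm
        exact (List.disjoint_of_nodup_append h) hm (List.mem_singleton_self _)⟩
    have hstep : PySem.Dict.ofList (ys ++ [p]) = (PySem.Dict.ofList ys).insert p.1 p.2 := by
      show (ys ++ [p]).foldl (fun d (x : String × ν) => d.insert x.1 x.2) PySem.Dict.empty = _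
      rw [List.foldl_append]
      rfl
    have hnc : (PySem.Dict.ofList ys).contains p.1 = false := by
      rw [PySem.Dict.contains_eq_decide_mem_keys]
      have : (PySem.Dict.ofList ys).keys = PySem.Set.ofList (ys.map Prod.fst) := by
        have := PySem.Dict.keys_foldl_insert_key ys Prod.fst (fun _ x => x.2) PySem.Dict.empty
        simpa [PySem.Dict.keys_empty, PySem.Set.update_nil_left] using this
      rw [this]
      simp [PySem.Set.mem_ofList, hmap.2]
    rw [hstep, PySem.Dict.items_insert_of_not_contains _ _ hnc, ih hmap.1]

-- the merged key order is duplicate-free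
theorem pvOrder_nodup {ν μ : Type} (d : PySem.Dict String ν) (e : PySem.Dict String μ)
    (hd : d.keys.Nodup) (he : e.keys.Nodup) :
    (d.keys ++ e.keys.filter (fun k => !(d.contains k))).Nodup := by
  apply List.Nodup.append hd (he.filter _)
  intro k hk1 hk2
  have := List.of_mem_filter hk2
  rw [PySem.Dict.contains_eq_decide_mem_keys] at this
  simp at this
  exact this hk1

-- items of a bulk update, as a map over the merged key order
theorem pvItems_update {ν : Type} (l : List (String × ν)) (d : PySem.Dict String ν)
    (dflt : ν) (hnd : d.keys.Nodup) :
    (d.update l).items =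
      (d.keys ++ (PySem.Dict.ofList l).keys.filter (fun k => !(d.contains k))).map
        (fun k => (k, if (PySem.Dict.ofList l).contains k then (PySem.Dict.ofList l).getD k dflt
                      else d.getD k dflt)) := by
  rw [PySem.Dict.items_eq_map_keys _ (PySem.Dict.nodup_keys_update _ _ hnd) dflt, pvKeys_update]
  apply List.map_congr_left
  intro k _
  rw [pvGetD_update]

-- the merged-constants helper is exactly the sub-dict update's items
theorem pvMergedConstants_eq (base : List (String × List (String × String))) (c : List (String × String)) :
    pvMergedConstants base c
      = ((PySem.Dict.ofList ((PySem.Dict.ofList base).getD "constants" [])).update c).items := by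
  unfold pvMergedConstants
  have hbc : (PySem.Dict.ofList ((PySem.Dict.ofList base).getD "constants" [])).keys.Nodup :=
    PySem.Dict.nodup_keys_ofList _
  have hcd : (PySem.Dict.ofList c).keys.Nodup := PySem.Dict.nodup_keys_ofList _
  rw [pvItems_ofList, pvItems_update c _ "" hbc]
  rw [List.map_map]
  simpa [Function.comp_def] using pvOrder_nodup _ _ hbc hcd

-- ===== VERDICT (by name: the statement is the Claim_ definition above) =====
theorem merge_monitor_config_fragment_spec : Claim_equal_merge_monitor_config_fragment := by
  intro base fragment _ hpre
  unfold Spec_merge_monitor_config_fragment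
  rw [pvFoldA_eq, pvMain fragment (PySem.Dict.ofList base) hpre]
  have hbnd : (PySem.Dict.ofList base).keys.Nodup := PySem.Dict.nodup_keys_ofList _
  have hfnd : (PySem.Dict.ofList fragment).keys.Nodup := PySem.Dict.nodup_keys_ofList _
  have hordnd : ((PySem.Dict.ofList base).keys
      ++ (PySem.Dict.ofList fragment).keys.filter
           (fun k => !((PySem.Dict.ofList base).contains k))).Nodup :=
    pvOrder_nodup _ _ hbnd hfnd
  cases hfc : (PySem.Dict.ofList fragment).get? "constants" with
  | none =>
      simp only [merge_monitor_config_fragment_alt, hfc]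
      rw [pvItems_ofList, pvItems_update fragment _ [] hbnd]
      rw [List.map_map]
      simpa [Function.comp_def] using hordnd
  | some c =>
      simp only [merge_monitor_config_fragment_alt, hfc]
      have hc : ((PySem.Dict.ofList base).update fragment).contains "constants" = true := by
        rw [PySem.Dict.contains_eq_isSome_get?, pvGet?_update, hfc]; rfl
      rw [PySem.Dict.items_insert_of_contains _ _ hc, pvItems_update fragment _ [] hbnd,
          List.map_map, pvItems_ofList]
      · apply List.map_congr_left
        intro k hk
        by_cases hkc : k = "constants"
        · subst hkc
          simp [pvMergedConstants_eq]
        · have hb : (k == "constants") = false := by simpa using hkc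
          simp [hb, hkc]
      · rw [List.map_map]
        simpa [Function.comp_def] using hordnd
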